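-- pv_equiv track=rewrite | github.com/linarsh09/python_example_repo | 1.py | solution
-- ===== SOURCE A (Python) =====
-- def solution(str):
-- 	str_split = str.split(' ')
-- 	res = ''
--
-- 	for s in str_split:
-- 		i = len(s) - 1
-- 		while i >= 0:
-- 			res += s[i]
-- 			i -= 1
-- 	return res
-- ===== SOURCE B (Python) =====
-- def solution(str):
--     # Single left-to-right pass: push non-space chars onto a stack; a space
--     # (and the end of input) flushes the stack in LIFO order into the result.
--     res = []
--     stack = []
--     for c in str:
--         if c == ' ':
--             while stack:
--                 res.append(stack.pop())
--         else:
--             stack.append(c)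
--     while stack:
--         res.append(stack.pop())
--     return ''.join(res)
-- ===== Notes on version B (the rewrite author's own statement) =====
-- stated objective: faster
-- what changed: Replaces split(' ') plus a per-word backwards index loop with quadratic string concatenation by a single left-to-right pass over the characters using a stack flushed in LIFO order at each space and at the end, joined once at the end; no call to split.
import Mathlib
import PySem

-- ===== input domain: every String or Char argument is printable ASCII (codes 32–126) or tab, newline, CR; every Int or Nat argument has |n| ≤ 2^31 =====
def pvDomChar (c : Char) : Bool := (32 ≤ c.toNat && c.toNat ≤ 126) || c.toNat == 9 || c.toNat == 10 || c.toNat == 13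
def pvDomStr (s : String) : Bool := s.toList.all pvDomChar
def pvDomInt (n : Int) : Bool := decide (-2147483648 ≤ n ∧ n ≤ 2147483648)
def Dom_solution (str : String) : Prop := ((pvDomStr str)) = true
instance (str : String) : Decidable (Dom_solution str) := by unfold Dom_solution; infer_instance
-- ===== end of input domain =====

-- B replaces split(' ') + per-word backwards index loop by a single pass with a LIFO stack flushed at each space and at the end (alternative decomposition, no split).


-- ===== PORT A =====
-- inner while loop: i = len(s)-1; while i >= 0: res += s[i]; i -= 1
-- (recursion on k = i + 1; index i = k - 1 is always in range so getD is exact)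
def solWhile (s : List Char) : Nat → List Char → List Char
  | 0, res => res
  | k + 1, res => solWhile s k (res ++ [s.getD k ' '])

def solution (str : String) : String :=
  let strSplit := PySem.Chars.splitOn str.toList [' ']
  let res := strSplit.foldl (fun res s => solWhile s s.length res) []
  String.ofList res

-- ===== PORT B =====
-- one pass: push non-space chars on a stack, flush it (LIFO) at each space and at the end
def solStep (p : List Char × List Char) (c : Char) : List Char × List Char :=
  if c = ' ' then (p.1 ++ p.2, []) else (p.1, c :: p.2)

def solution_alt (str : String) : String :=
  let p := str.toList.foldl solStep ([], [])
  String.ofList (p.1 ++ p.2)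

-- ===== PRECONDITION & SPEC =====
def Spec_solution (str : String) (out : String) : Prop := out = solution_alt str
instance (str : String) (out : String) : Decidable (Spec_solution str out) := by unfold Spec_solution; infer_instance

-- ===== CLAIM (what is proved, stated in full; the proofs are below) =====
def Claim_equal_solution : Prop := ∀ (str : String), Dom_solution str → Spec_solution str (solution str)

-- ===== LEMMAS AND PROOFS =====

-- reference spine: the flush-at-spaces reading of the result, with the pending stack
def revWords (stack : List Char) : List Char → List Char
  | [] => stack
  | c :: t => if c = ' ' then stack ++ revWords [] t else revWords (c :: stack) t

theorem solWhile_eq (s : List Char) :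
    ∀ k res, k ≤ s.length → solWhile s k res = res ++ (s.take k).reverse := by
  intro k
  induction k with
  | zero => intro res _; simp [solWhile]
  | succ k ih =>
    intro res h
    have hk : k < s.length := by omega
    rw [solWhile, ih _ (by omega)]
    have h2 : s.getD k ' ' = s[k] := by simp [List.getD, List.getElem?_eq_getElem hk]
    have h1 : List.take (k+1) s = List.take k s ++ [s[k]] := by
      rw [List.take_add_one, List.getElem?_eq_getElem hk]
      rfl
    rw [h2, h1, List.reverse_append]
    simp only [List.reverse_cons, List.reverse_nil, List.nil_append, List.singleton_append,
      List.append_assoc]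

theorem flatten_reverse_go (fuel : Nat) :
    ∀ (l cur : List Char) (acc : List (List Char)), l.length ≤ fuel →
      ((PySem.Chars.splitOn.go [' '] fuel l cur acc).map List.reverse).flatten
        = (acc.reverse.map List.reverse).flatten ++ revWords cur l := by
  induction fuel with
  | zero =>
    intro l cur acc h
    have : l = [] := by cases l <;> simp_all
    subst this
    rw [PySem.Chars.splitOn.go]
    simp [revWords]
  | succ fuel ih =>
    intro l cur acc h
    cases l with
    | nil =>
      rw [PySem.Chars.splitOn.go]
      simp [revWords]
      omega
    | cons c rest =>
      rw [PySem.Chars.splitOn.go]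
      by_cases hc : c = ' '
      · subst hc
        rw [if_pos (by simp [List.isPrefixOf])]
        rw [ih _ _ _ (by simpa using Nat.le_of_succ_le_succ h)]
        simp [revWords]
      · have hpre : ([' '].isPrefixOf (c :: rest)) = false := by
          simp [List.isPrefixOf]; exact fun hh => (hc hh.symm).elim
        rw [if_neg (by simp [hpre])]
        rw [ih _ _ _ (by simpa using Nat.le_of_succ_le_succ h)]
        simp [revWords, hc]

theorem solA_eq_revWords (l : List Char) :
    ((PySem.Chars.splitOn l [' ']).map List.reverse).flatten = revWords [] l := by
  have := flatten_reverse_go (l.length + 1) l [] [] (by omega)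
  simpa [PySem.Chars.splitOn] using this

theorem foldl_solWhile (ws : List (List Char)) :
    ∀ res, ws.foldl (fun res s => solWhile s s.length res) res
      = res ++ (ws.map List.reverse).flatten := by
  induction ws with
  | nil => intro res; simp
  | cons w t ih =>
    intro res
    simp only [List.foldl_cons]
    rw [solWhile_eq w w.length res le_rfl, ih]
    simp

theorem foldl_solStep (l : List Char) :
    ∀ res stack, (l.foldl solStep (res, stack)).1 ++ (l.foldl solStep (res, stack)).2
      = res ++ revWords stack l := by
  induction l with
  | nil => intro res stack; simp [revWords]
  | cons c t ih =>
    intro res stack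
    by_cases hc : c = ' '
    · subst hc
      simp only [List.foldl_cons, solStep]
      rw [ih]
      simp [revWords]
    · simp only [List.foldl_cons, solStep, if_neg hc]
      rw [ih]
      simp [revWords, hc]

-- ===== VERDICT (by name: the statement is the Claim_ definition above) =====
theorem solution_spec : Claim_equal_solution := by
  intro str _
  unfold Spec_solution solution solution_alt
  simp only []
  rw [foldl_solWhile, solA_eq_revWords, foldl_solStep]
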